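-- pv_equiv track=rewrite | github.com/fctr-id/okta-ai-agent | src/utils/security_config.py | _is_allowed_user_function
-- ===== SOURCE A (Python) =====
-- ALLOWED_USER_FUNCTION_PATTERNS = {
--     # Data processing functions (using wildcards)
--     'fetch_*', 'get_*', 'extract_*', 'process_*', 'parse_*', 'format_*',
--     'collect_*', 'aggregate_*', 'combine_*', 'merge_*', 'filter_*',
--
--     # Helper functions
--     'handle_*', 'create_*', 'build_*', 'setup_*', 'init_*',
--     'calculate_*', 'validate_*', 'check_*', 'verify_*',
--     'safe_*',  # Safe helper functions like safe_join, safe_get, etc.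
--
--     # Main execution functions
--     'main', 'run_*', 'execute_*', 'start_*'
-- }
--
-- def _is_allowed_user_function(func_name: str) -> bool:
--     """
--     Check if a function name matches allowed user-defined function patterns
--
--     Args:
--         func_name: Name of the function to check
--
--     Returns:
--         True if function name matches allowed patterns
--     """
--     for pattern in ALLOWED_USER_FUNCTION_PATTERNS:
--         if pattern.endswith('*'):
--             # Wildcard pattern - check if function name starts with the prefix
--             prefix = pattern[:-1]  # Remove the *
--             if func_name.startswith(prefix):
--                 return True
--         else:
--             # Exact match
--             if func_name == pattern:
--                 return True
--     return False
-- ===== SOURCE B (Python) =====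
-- # Precomputed index of ALLOWED_USER_FUNCTION_PATTERNS: the exact names, and the
-- # prefixes of the wildcard patterns (pattern minus its trailing '*').
-- _EXACT = frozenset({'main'})
-- _WILDCARD_PREFIXES = frozenset({
--     'fetch_', 'get_', 'extract_', 'process_', 'parse_', 'format_',
--     'collect_', 'aggregate_', 'combine_', 'merge_', 'filter_',
--     'handle_', 'create_', 'build_', 'setup_', 'init_',
--     'calculate_', 'validate_', 'check_', 'verify_',
--     'safe_', 'run_', 'execute_', 'start_',
-- })
-- _MAX_PREFIX_LEN = max(map(len, _WILDCARD_PREFIXES))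
--
--
-- def _is_allowed_user_function(func_name: str) -> bool:
--     if func_name in _EXACT:
--         return True
--     for i in range(min(len(func_name), _MAX_PREFIX_LEN) + 1):
--         if func_name[:i] in _WILDCARD_PREFIXES:
--             return True
--     return False
-- ===== Notes on version B (the rewrite author's own statement) =====
-- stated objective: alternative
-- what changed: Instead of scanning the pattern list and calling startswith per pattern, B keeps a precomputed index (a frozenset of exact names and a frozenset of wildcard prefixes) and probes it with each prefix of the input up to the longest prefix length.
import Mathlib
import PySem

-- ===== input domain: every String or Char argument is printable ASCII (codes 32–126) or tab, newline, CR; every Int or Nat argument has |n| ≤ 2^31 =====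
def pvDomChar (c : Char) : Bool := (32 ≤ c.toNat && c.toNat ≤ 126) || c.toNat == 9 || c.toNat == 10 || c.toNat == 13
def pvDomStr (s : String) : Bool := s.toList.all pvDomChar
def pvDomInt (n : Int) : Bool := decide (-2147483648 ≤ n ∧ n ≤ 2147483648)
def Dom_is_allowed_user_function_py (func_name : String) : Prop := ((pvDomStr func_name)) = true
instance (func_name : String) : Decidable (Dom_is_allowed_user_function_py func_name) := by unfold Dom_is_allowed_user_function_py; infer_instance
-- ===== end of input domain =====

-- B replaces A's per-pattern startswith scan by a precomputed index (exact names, wildcard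
-- prefixes) probed with the input's prefixes up to the longest prefix length (objective: alternative).

-- ===== PORT A =====
def pvPatternsA : List String :=
  ["fetch_*", "get_*", "extract_*", "process_*", "parse_*", "format_*",
   "collect_*", "aggregate_*", "combine_*", "merge_*", "filter_*",
   "handle_*", "create_*", "build_*", "setup_*", "init_*",
   "calculate_*", "validate_*", "check_*", "verify_*",
   "safe_*", "main", "run_*", "execute_*", "start_*"]

def pvLoopA (fn : String) : List String → Bool
  | [] => false
  | p :: rest =>
    if PySem.Str.endswith p "*" then
      if PySem.Str.startswith fn (PySem.Str.slice p none (some (-1))) then true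
      else pvLoopA fn rest
    else if fn == p then true else pvLoopA fn rest

def is_allowed_user_function_py (func_name : String) : Bool :=
  pvLoopA func_name pvPatternsA

-- ===== PORT B =====
def pvExactB : PySem.Set String := PySem.Set.ofList ["main"]

def pvWildB : PySem.Set String :=
  PySem.Set.ofList
    ["fetch_", "get_", "extract_", "process_", "parse_", "format_",
     "collect_", "aggregate_", "combine_", "merge_", "filter_",
     "handle_", "create_", "build_", "setup_", "init_",
     "calculate_", "validate_", "check_", "verify_",
     "safe_", "run_", "execute_", "start_"]

-- max(map(len, _WILDCARD_PREFIXES)); the set is nonempty, so the default is never used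
def pvMaxPrefixLenB : Int := PySem.List.maxD (pvWildB.map PySem.Str.len) (fun n => n) 0

def is_allowed_user_function_py_alt (func_name : String) : Bool :=
  if PySem.Set.contains pvExactB func_name then true
  else (PySem.List.pyRange 0 (min (PySem.Str.len func_name) pvMaxPrefixLenB + 1) 1).any
    (fun i => PySem.Set.contains pvWildB (PySem.Str.slice func_name none (some i)))

-- ===== PRECONDITION & SPEC =====
def Spec_is_allowed_user_function_py (func_name : String) (out : Bool) : Prop := out = is_allowed_user_function_py_alt func_name
instance (func_name : String) (out : Bool) : Decidable (Spec_is_allowed_user_function_py func_name out) := by unfold Spec_is_allowed_user_function_py; infer_instance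

-- ===== CLAIM (what is proved, stated in full; the proofs are below) =====
def Claim_equal_is_allowed_user_function_py : Prop := ∀ (func_name : String), Dom_is_allowed_user_function_py func_name → Spec_is_allowed_user_function_py func_name (is_allowed_user_function_py func_name)

-- ===== LEMMAS AND PROOFS =====

-- the 24 wildcard prefixes, in A's pattern order
def pvW : List String :=
  ["fetch_", "get_", "extract_", "process_", "parse_", "format_",
   "collect_", "aggregate_", "combine_", "merge_", "filter_",
   "handle_", "create_", "build_", "setup_", "init_",
   "calculate_", "validate_", "check_", "verify_",
   "safe_", "run_", "execute_", "start_"]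

lemma pvWildB_eval : pvWildB = pvW := by decide

lemma pvMaxPrefixLenB_eval : pvMaxPrefixLenB = 10 := by decide

-- a prefix of fn of some length i < min(len fn, M) + 1 equals p  ↔  fn startswith p
-- (for p no longer than M)
lemma pv_prefix_slice_iff (fn p : String) (M : Int) (hpM : (p.toList.length : ℤ) ≤ M) :
    (∃ i : ℤ, 0 ≤ i ∧ i < min (PySem.Str.len fn) M + 1 ∧ PySem.Str.slice fn none (some i) = p)
      ↔ PySem.Str.startswith fn p = true := by
  rw [show PySem.Str.startswith fn p = PySem.Chars.startswith fn.toList p.toList from by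
        simp [pysem]]
  rw [PySem.Chars.startswith_iff]
  constructor
  · rintro ⟨i, h0, _, hs⟩
    rw [← String.toList_inj] at hs
    rw [show (PySem.Str.slice fn none (some i)).toList
          = PySem.List.slice fn.toList none (some i) from by simp [pysem]] at hs
    rw [PySem.List.slice_to _ h0] at hs
    rw [← hs]
    exact List.take_prefix _ _
  · intro h
    refine ⟨(p.toList.length : ℤ), by positivity, ?_, ?_⟩
    · have hle := h.length_le
      have hlen : PySem.Str.len fn = (fn.toList.length : ℤ) := by simp [pysem]
      omega
    · rw [← String.toList_inj]
      rw [show (PySem.Str.slice fn none (some (p.toList.length : ℤ))).toList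
            = PySem.List.slice fn.toList none (some (p.toList.length : ℤ)) from by simp [pysem]]
      rw [PySem.List.slice_to _ (by positivity)]
      simp
      exact (List.prefix_iff_eq_take.mp h).symm

lemma pvLoopA_eq_any (fn : String) (ps : List String) :
    pvLoopA fn ps = ps.any (fun p =>
      if PySem.Str.endswith p "*" then
        PySem.Str.startswith fn (PySem.Str.slice p none (some (-1)))
      else fn == p) := by
  induction ps with
  | nil => rfl
  | cons p rest ih =>
    simp only [pvLoopA, List.any_cons, ← ih]
    split_ifs <;> simp_all

lemma pvA_eq (fn : String) :
    is_allowed_user_function_py fn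
      = ((fn == "main") || pvW.any (fun p => PySem.Str.startswith fn p)) := by
  rw [is_allowed_user_function_py, pvLoopA_eq_any]
  simp only [pvPatternsA, pvW, List.any_cons, List.any_nil,
    (show PySem.Str.endswith "fetch_*" "*" = true from by decide),
    (show PySem.Str.slice "fetch_*" none (some (-1)) = "fetch_" from by decide),
    (show PySem.Str.endswith "get_*" "*" = true from by decide),
    (show PySem.Str.slice "get_*" none (some (-1)) = "get_" from by decide),
    (show PySem.Str.endswith "extract_*" "*" = true from by decide),
    (show PySem.Str.slice "extract_*" none (some (-1)) = "extract_" from by decide),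
    (show PySem.Str.endswith "process_*" "*" = true from by decide),
    (show PySem.Str.slice "process_*" none (some (-1)) = "process_" from by decide),
    (show PySem.Str.endswith "parse_*" "*" = true from by decide),
    (show PySem.Str.slice "parse_*" none (some (-1)) = "parse_" from by decide),
    (show PySem.Str.endswith "format_*" "*" = true from by decide),
    (show PySem.Str.slice "format_*" none (some (-1)) = "format_" from by decide),
    (show PySem.Str.endswith "collect_*" "*" = true from by decide),
    (show PySem.Str.slice "collect_*" none (some (-1)) = "collect_" from by decide),
    (show PySem.Str.endswith "aggregate_*" "*" = true from by decide),
    (show PySem.Str.slice "aggregate_*" none (some (-1)) = "aggregate_" from by decide),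
    (show PySem.Str.endswith "combine_*" "*" = true from by decide),
    (show PySem.Str.slice "combine_*" none (some (-1)) = "combine_" from by decide),
    (show PySem.Str.endswith "merge_*" "*" = true from by decide),
    (show PySem.Str.slice "merge_*" none (some (-1)) = "merge_" from by decide),
    (show PySem.Str.endswith "filter_*" "*" = true from by decide),
    (show PySem.Str.slice "filter_*" none (some (-1)) = "filter_" from by decide),
    (show PySem.Str.endswith "handle_*" "*" = true from by decide),
    (show PySem.Str.slice "handle_*" none (some (-1)) = "handle_" from by decide),
    (show PySem.Str.endswith "create_*" "*" = true from by decide),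
    (show PySem.Str.slice "create_*" none (some (-1)) = "create_" from by decide),
    (show PySem.Str.endswith "build_*" "*" = true from by decide),
    (show PySem.Str.slice "build_*" none (some (-1)) = "build_" from by decide),
    (show PySem.Str.endswith "setup_*" "*" = true from by decide),
    (show PySem.Str.slice "setup_*" none (some (-1)) = "setup_" from by decide),
    (show PySem.Str.endswith "init_*" "*" = true from by decide),
    (show PySem.Str.slice "init_*" none (some (-1)) = "init_" from by decide),
    (show PySem.Str.endswith "calculate_*" "*" = true from by decide),
    (show PySem.Str.slice "calculate_*" none (some (-1)) = "calculate_" from by decide),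
    (show PySem.Str.endswith "validate_*" "*" = true from by decide),
    (show PySem.Str.slice "validate_*" none (some (-1)) = "validate_" from by decide),
    (show PySem.Str.endswith "check_*" "*" = true from by decide),
    (show PySem.Str.slice "check_*" none (some (-1)) = "check_" from by decide),
    (show PySem.Str.endswith "verify_*" "*" = true from by decide),
    (show PySem.Str.slice "verify_*" none (some (-1)) = "verify_" from by decide),
    (show PySem.Str.endswith "safe_*" "*" = true from by decide),
    (show PySem.Str.slice "safe_*" none (some (-1)) = "safe_" from by decide),
    (show PySem.Str.endswith "run_*" "*" = true from by decide),
    (show PySem.Str.slice "run_*" none (some (-1)) = "run_" from by decide),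
    (show PySem.Str.endswith "execute_*" "*" = true from by decide),
    (show PySem.Str.slice "execute_*" none (some (-1)) = "execute_" from by decide),
    (show PySem.Str.endswith "start_*" "*" = true from by decide),
    (show PySem.Str.slice "start_*" none (some (-1)) = "start_" from by decide),
    (show PySem.Str.endswith "main" "*" = false from by decide)
,
    if_true, Bool.or_false]
  ac_rfl

lemma pvB_eq (fn : String) :
    is_allowed_user_function_py_alt fn
      = ((fn == "main") || pvW.any (fun p => PySem.Str.startswith fn p)) := by
  rw [is_allowed_user_function_py_alt, pvWildB_eval, pvMaxPrefixLenB_eval]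
  have hc : PySem.Set.contains pvExactB fn = (fn == "main") := by
    show List.contains ["main"] fn = (fn == "main")
    rw [List.contains_cons, show List.contains ([] : List String) fn = false from rfl,
       Bool.or_false]
  rw [hc]
  cases h : (fn == "main") with
  | true => simp
  | false =>
    simp only [Bool.false_eq_true, if_false, Bool.false_or]
    rw [Bool.eq_iff_iff]
    simp only [List.any_eq_true, PySem.List.mem_pyRange_one]
    have hmem : ∀ s : String, PySem.Set.contains pvW s = true ↔ s ∈ pvW := by
      intro s
      show List.contains pvW s = true ↔ s ∈ pvW
      exact List.contains_iff_mem
    have hW : ∀ p ∈ pvW, ((p.toList.length : ℤ) ≤ 10) := by decide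
    constructor
    · rintro ⟨i, ⟨h0, hlt⟩, hcon⟩
      have hpmem := (hmem _).mp hcon
      exact ⟨_, hpmem, (pv_prefix_slice_iff fn _ 10 (hW _ hpmem)).mp ⟨i, h0, hlt, rfl⟩⟩
    · rintro ⟨p, hp, hsw⟩
      obtain ⟨i, h0, hlt, hs⟩ := (pv_prefix_slice_iff fn p 10 (hW _ hp)).mpr hsw
      exact ⟨i, ⟨h0, hlt⟩, (hmem _).mpr (hs ▸ hp)⟩

-- ===== VERDICT (by name: the statement is the Claim_ definition above) =====
theorem is_allowed_user_function_py_spec : Claim_equal_is_allowed_user_function_py := by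
  intro fn _
  unfold Spec_is_allowed_user_function_py
  rw [pvA_eq, pvB_eq]
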